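-- pv_equiv track=rewrite | github.com/gaurav6386/Python-projects | 2048(FULL)/user48_zXTZ7A3M9CcNhTd_0.py | mergetiles
-- ===== SOURCE A (Python) =====
-- def mergetiles(shifted_line):
--     """
--     merge the left shifted list
--     """
--     newline=[]
--     count=0
--     if len(shifted_line)==1:
--         newline.append(shifted_line[0])
--     else:
--         index=1
--         while index< len(shifted_line):
--             if shifted_line[index-1]==shifted_line[index]:
--                 num = shifted_line[index-1]+shifted_line[index]
--                 count+=1
--                 index+=2
--             else:
--                 num =shifted_line[index-1]
--                 count+=1
--                 index+=1
--             newline.append(num)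
--         #print count
--         if index ==len(shifted_line):
--             newline.append(shifted_line[index-1])
--             count+=1
--
--         for index in range(count,len(shifted_line)):
--             newline.append(0)
--
--     return newline
-- ===== SOURCE B (Python) =====
-- from itertools import groupby
--
-- def mergetiles(shifted_line):
--     """
--     merge the left shifted list
--     """
--     newline = []
--     for value, group in groupby(shifted_line):
--         k = len(list(group))
--         newline.extend([value + value] * (k // 2))
--         if k % 2:
--             newline.append(value)
--     newline.extend([0] * (len(shifted_line) - len(newline)))
--     return newline
-- ===== Notes on version B (the rewrite author's own statement) =====
-- stated objective: idiomatic
-- what changed: B replaces A's index-stepping while loop (with pair lookbacks, a manual trailing-element fixup and a counted zero-padding loop) by grouping the line into maximal runs of equal tiles (itertools.groupby), emitting k//2 merged tiles plus an odd leftover per run, then padding with zeros to the original length.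
import Mathlib
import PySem

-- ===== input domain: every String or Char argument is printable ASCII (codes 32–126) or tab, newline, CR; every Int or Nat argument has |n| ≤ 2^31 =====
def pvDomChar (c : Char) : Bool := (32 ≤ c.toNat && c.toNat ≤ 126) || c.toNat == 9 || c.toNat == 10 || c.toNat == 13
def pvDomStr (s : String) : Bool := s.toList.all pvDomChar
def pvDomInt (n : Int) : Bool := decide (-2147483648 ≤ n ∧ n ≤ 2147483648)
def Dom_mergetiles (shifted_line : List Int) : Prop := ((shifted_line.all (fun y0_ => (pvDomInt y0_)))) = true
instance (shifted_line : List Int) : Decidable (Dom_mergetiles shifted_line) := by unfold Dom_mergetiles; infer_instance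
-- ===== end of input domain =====

-- B groups the line into maximal runs of equal tiles and expands each run, instead of A's
-- index-stepping merge scan; equal cost, plainer shape.

-- ===== PORT A =====
-- the while loop: state (newline, index, count); indices are in range whenever read
def mergetilesLoopA (l : List Int) (index : Nat) (newline : List Int) (count : Nat) :
    List Int × Nat × Nat :=
  if _h : index < l.length then
    if l.getD (index - 1) 0 = l.getD index 0 then
      mergetilesLoopA l (index + 2) (newline ++ [l.getD (index - 1) 0 + l.getD index 0]) (count + 1)
    else
      mergetilesLoopA l (index + 1) (newline ++ [l.getD (index - 1) 0]) (count + 1)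
  else (newline, index, count)
termination_by l.length - index

def mergetiles (shifted_line : List Int) : List Int :=
  if shifted_line.length = 1 then
    [shifted_line.getD 0 0]
  else
    let r := mergetilesLoopA shifted_line 1 [] 0
    let newline := if r.2.1 = shifted_line.length
      then r.1 ++ [shifted_line.getD (r.2.1 - 1) 0] else r.1
    let count := if r.2.1 = shifted_line.length then r.2.2 + 1 else r.2.2
    newline ++ List.replicate (shifted_line.length - count) 0

-- ===== PORT B =====
-- length of the leading run of value v (groupby's current group, minus the head already taken)
def runLenB (v : Int) : List Int → Nat
  | [] => 0
  | x :: t => if x = v then 1 + runLenB v t else 0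

-- one pass over the maximal runs: k//2 merged tiles, plus the odd leftover
def mergetilesCoreB : List Int → List Int
  | [] => []
  | x :: t =>
    let k := 1 + runLenB x t
    (List.replicate (k / 2) (x + x) ++ if k % 2 = 1 then [x] else [])
      ++ mergetilesCoreB (t.drop (runLenB x t))
termination_by l => l.length
decreasing_by simp

def mergetiles_alt (shifted_line : List Int) : List Int :=
  let newline := mergetilesCoreB shifted_line
  newline ++ List.replicate (shifted_line.length - newline.length) 0

-- ===== PRECONDITION & SPEC =====
def Spec_mergetiles (shifted_line : List Int) (out : List Int) : Prop := out = mergetiles_alt shifted_line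
instance (shifted_line : List Int) (out : List Int) : Decidable (Spec_mergetiles shifted_line out) := by unfold Spec_mergetiles; infer_instance

-- ===== CLAIM (what is proved, stated in full; the proofs are below) =====
def Claim_equal_mergetiles : Prop := ∀ (shifted_line : List Int), Dom_mergetiles shifted_line → Spec_mergetiles shifted_line (mergetiles shifted_line)

-- ===== LEMMAS AND PROOFS =====

-- common reference: the classic two-step adjacent merge
def mcore : List Int → List Int
  | [] => []
  | [x] => [x]
  | x :: y :: t => if x = y then (x + y) :: mcore t else x :: mcore (y :: t)

theorem mcore_run : ∀ (j : Nat) (x : Int) (t : List Int), t.head? ≠ some x →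
    mcore (List.replicate (j + 1) x ++ t) =
      (List.replicate ((j + 1) / 2) (x + x) ++ if (j + 1) % 2 = 1 then [x] else []) ++ mcore t
  | 0, x, t, h => by
    cases t with
    | nil => simp [mcore]
    | cons y r =>
      have hxy : x ≠ y := fun e => h (by simp [e])
      simp [mcore, hxy]
  | 1, x, t, h => by simp [mcore]
  | (j + 2), x, t, h => by
    have ih := mcore_run j x t h
    have e1 : List.replicate (j + 3) x ++ t = x :: x :: (List.replicate (j + 1) x ++ t) := by
      simp [List.replicate_succ]
    have e2 : (j + 3) / 2 = (j + 1) / 2 + 1 := by omega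
    have e3 : (j + 3) % 2 = (j + 1) % 2 := by omega
    have hm : mcore (x :: x :: (List.replicate (j + 1) x ++ t))
        = (x + x) :: mcore (List.replicate (j + 1) x ++ t) := by simp [mcore]
    rw [e1, hm, ih, e2, e3, List.replicate_succ]
    simp

theorem runLenB_cons_eq (x : Int) (r : List Int) :
    runLenB x (x :: r) = runLenB x r + 1 := by simp [runLenB]; omega

theorem runLenB_split : ∀ (t : List Int) (x : Int),
    List.replicate (runLenB x t) x ++ t.drop (runLenB x t) = t
  | [], x => rfl
  | y :: r, x => by
    by_cases h : y = x
    · subst h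
      rw [runLenB_cons_eq, List.replicate_succ, List.drop_succ_cons, List.cons_append,
        runLenB_split r y]
    · simp [runLenB, h]

theorem runLenB_drop_head : ∀ (t : List Int) (x : Int),
    (t.drop (runLenB x t)).head? ≠ some x
  | [], x => by simp [runLenB]
  | y :: r, x => by
    by_cases h : y = x
    · subst h
      rw [runLenB_cons_eq, List.drop_succ_cons]
      exact runLenB_drop_head r y
    · simp [runLenB, h]

theorem coreB_eq_mcore : ∀ (l : List Int), mergetilesCoreB l = mcore l
  | [] => by simp [mergetilesCoreB, mcore]
  | x :: t => by
    have ih := coreB_eq_mcore (t.drop (runLenB x t))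
    have hhead := runLenB_drop_head t x
    have hm : mcore (x :: t) =
        (List.replicate ((runLenB x t + 1) / 2) (x + x) ++
          if (runLenB x t + 1) % 2 = 1 then [x] else []) ++ mcore (t.drop (runLenB x t)) := by
      conv_lhs => rw [show x :: t = List.replicate (runLenB x t + 1) x ++ t.drop (runLenB x t) by
        rw [List.replicate_succ, List.cons_append, runLenB_split t x]]
      exact mcore_run (runLenB x t) x _ hhead
    rw [hm, ← ih]
    simp only [mergetilesCoreB]
    simp [Nat.add_comm 1 (runLenB x t)]
termination_by l => l.length
decreasing_by simp

-- characterisation of A's loop (plus the trailing-element fixup) as mcore of the suffix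
theorem loopA_char : ∀ (s l : List Int) (index : Nat) (newline : List Int) (count : Nat),
    1 ≤ index → s = l.drop (index - 1) →
    ((if (mergetilesLoopA l index newline count).2.1 = l.length
        then (mergetilesLoopA l index newline count).1 ++
          [l.getD ((mergetilesLoopA l index newline count).2.1 - 1) 0]
        else (mergetilesLoopA l index newline count).1),
     (if (mergetilesLoopA l index newline count).2.1 = l.length
        then (mergetilesLoopA l index newline count).2.2 + 1
        else (mergetilesLoopA l index newline count).2.2))
      = (newline ++ mcore s, count + (mcore s).length)
  | [], l, index, newline, count, h1, hs => by
    have hge : l.length ≤ index - 1 := by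
      have := congrArg List.length hs; simp at this; omega
    have hnl : ¬ index < l.length := by omega
    rw [mergetilesLoopA, dif_neg hnl]
    have : index ≠ l.length := by omega
    simp [this, mcore]
  | [x], l, index, newline, count, h1, hs => by
    have hlen : l.length - (index - 1) = 1 := by
      have := congrArg List.length hs; simp at this; omega
    have hlt : index - 1 < l.length := by omega
    have heq : index = l.length := by omega
    have hnl : ¬ index < l.length := by omega
    have hget : l[index - 1]? = some x := by
      rw [← List.head?_drop, ← hs]; rfl
    have hgetn : l[l.length - 1]? = some x := heq ▸ hget
    rw [mergetilesLoopA, dif_neg hnl]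
    simp [heq, hgetn, mcore]
  | x :: y :: t, l, index, newline, count, h1, hs => by
    have hlen : l.length - (index - 1) = t.length + 2 := by
      have := congrArg List.length hs; simp at this; omega
    have hlt : index < l.length := by omega
    have hgx : l.getD (index - 1) 0 = x := by
      have : l[index - 1]? = some x := by rw [← List.head?_drop, ← hs]; rfl
      simp [List.getD_eq_getElem?_getD, this]
    have hgy : l.getD index 0 = y := by
      have hstep : l.drop index = y :: t := by
        have : l.drop index = (l.drop (index - 1)).drop 1 := by
          rw [List.drop_drop]; congr 1; omega
        rw [this, ← hs]; rfl
      have : l[index]? = some y := by rw [← List.head?_drop, hstep]; rfl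
      simp [List.getD_eq_getElem?_getD, this]
    rw [mergetilesLoopA, dif_pos hlt, hgx, hgy]
    by_cases hxy : x = y
    · rw [if_pos hxy]
      have hdrop : t = l.drop (index + 2 - 1) := by
        have : l.drop (index + 1) = (l.drop (index - 1)).drop 2 := by
          rw [List.drop_drop]; congr 1; omega
        rw [show index + 2 - 1 = index + 1 by omega, this, ← hs]; rfl
      have ih := loopA_char t l (index + 2)
        (newline ++ [l.getD (index - 1) 0 + l.getD index 0]) (count + 1) (by omega) hdrop
      rw [hgx, hgy] at ih
      have hm : mcore (x :: y :: t) = (x + y) :: mcore t := by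
        simp only [mcore]; rw [if_pos hxy]
      rw [ih, hm]
      simp only [Prod.mk.injEq]
      exact ⟨by simp, by simp; omega⟩
    · rw [if_neg hxy]
      have hdrop : y :: t = l.drop (index + 1 - 1) := by
        have : l.drop index = (l.drop (index - 1)).drop 1 := by
          rw [List.drop_drop]; congr 1; omega
        rw [show index + 1 - 1 = index by omega, this, ← hs]; rfl
      have ih := loopA_char (y :: t) l (index + 1)
        (newline ++ [l.getD (index - 1) 0]) (count + 1) (by omega) hdrop
      rw [hgx] at ih
      have hm : mcore (x :: y :: t) = x :: mcore (y :: t) := by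
        simp only [mcore]; rw [if_neg hxy]
      rw [ih, hm]
      simp only [Prod.mk.injEq]
      exact ⟨by simp, by simp; omega⟩
termination_by s => s.length

theorem mergetiles_eq_alt (l : List Int) : mergetiles l = mergetiles_alt l := by
  unfold mergetiles mergetiles_alt
  rw [coreB_eq_mcore]
  by_cases h1 : l.length = 1
  · rw [if_pos h1]
    match l, h1 with
    | [x], _ => simp [mcore]
  · rw [if_neg h1]
    have hchar := loopA_char l l 1 [] 0 (by omega) (by simp)
    have e1 : (if (mergetilesLoopA l 1 [] 0).2.1 = l.length
        then (mergetilesLoopA l 1 [] 0).1 ++ [l.getD ((mergetilesLoopA l 1 [] 0).2.1 - 1) 0]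
        else (mergetilesLoopA l 1 [] 0).1) = mcore l := by
      have := congrArg Prod.fst hchar; simpa using this
    have e2 : (if (mergetilesLoopA l 1 [] 0).2.1 = l.length
        then (mergetilesLoopA l 1 [] 0).2.2 + 1
        else (mergetilesLoopA l 1 [] 0).2.2) = (mcore l).length := by
      have := congrArg Prod.snd hchar; simpa using this
    simp only [e1, e2]

-- ===== VERDICT (by name: the statement is the Claim_ definition above) =====
theorem mergetiles_spec : Claim_equal_mergetiles := by
  intro l _
  unfold Spec_mergetiles
  exact mergetiles_eq_alt l
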